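-- pv_equiv track=rewrite | github.com/Jooc/LeetCode | python-version/leetcode/Solution_2028.py | missingRolls_0
-- ===== SOURCE A (Python) =====
-- from typing import List
--
-- def missingRolls_0(rolls: List[int], mean: int, n: int) -> List[int]:
--     m = len(rolls)
--     sum_m = 0
--     for roll in rolls:
--         sum_m += roll
--
--     sum_n = (n + m) * mean - sum_m
--     if sum_n > 6 * n or sum_n < n:
--         return []
--
--     ans, index = [1] * n, 0
--     sum_n -= n
--     while sum_n > 0:
--         ans[index] += 1
--         if ans[index] == 6:
--             index += 1
--         sum_n -= 1
--
--     return ans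
-- ===== SOURCE B (Python) =====
-- from typing import List
--
-- def missingRolls_0(rolls: List[int], mean: int, n: int) -> List[int]:
--     need = (n + len(rolls)) * mean - sum(rolls)
--     if not (n <= need <= 6 * n):
--         return []
--     q, r = divmod(need - n, 5)
--     if r:
--         return [6] * q + [1 + r] + [1] * (n - q - 1)
--     return [6] * q + [1] * (n - q)
-- ===== Notes on version B (the rewrite author's own statement) =====
-- stated objective: simpler
-- what changed: B replaces A's unit-increment while loop (one pass per missing pip, with a moving index) by a closed-form divmod that builds the answer directly as [6]*q + [1+r] + [1]*(rest).
import Mathlib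
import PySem

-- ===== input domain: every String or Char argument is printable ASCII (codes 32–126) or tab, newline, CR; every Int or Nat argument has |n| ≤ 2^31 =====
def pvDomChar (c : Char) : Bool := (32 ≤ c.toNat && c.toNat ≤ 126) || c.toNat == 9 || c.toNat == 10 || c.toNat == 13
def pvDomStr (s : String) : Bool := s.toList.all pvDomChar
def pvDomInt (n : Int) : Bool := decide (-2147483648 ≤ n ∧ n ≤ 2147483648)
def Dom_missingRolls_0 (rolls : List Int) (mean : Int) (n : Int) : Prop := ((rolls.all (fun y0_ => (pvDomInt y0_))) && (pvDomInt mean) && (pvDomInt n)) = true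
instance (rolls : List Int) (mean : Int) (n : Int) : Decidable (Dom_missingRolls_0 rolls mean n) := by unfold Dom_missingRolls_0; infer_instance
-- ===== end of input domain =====

-- B replaces A's unit-increment while loop with a closed-form divmod distribution; objective: simpler.

-- ===== PORT A =====
-- ans[index] += 1  (list element assignment; out-of-range index is unreachable inside A's guard)
def pvSetAdd : List Int → Nat → List Int
  | [], _ => []
  | a :: l, 0 => (a + 1) :: l
  | a :: l, k + 1 => a :: pvSetAdd l k

-- the while loop of A: state (ans, index), counts sum_n down to 0
def pvLoopA (ans : List Int) (index : Nat) (sum_n : Int) : List Int :=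
  if sum_n > 0 then
    let ans' := pvSetAdd ans index
    let index' := if ans'.getD index 0 == 6 then index + 1 else index
    pvLoopA ans' index' (sum_n - 1)
  else ans
termination_by sum_n.toNat
decreasing_by omega

def missingRolls_0 (rolls : List Int) (mean : Int) (n : Int) : List Int :=
  let m : Int := rolls.length
  let sum_m := rolls.foldl (fun acc roll => acc + roll) 0
  let sum_n := (n + m) * mean - sum_m
  if sum_n > 6 * n ∨ sum_n < n then []
  else pvLoopA (List.replicate n.toNat 1) 0 (sum_n - n)

-- ===== PORT B =====
def missingRolls_0_alt (rolls : List Int) (mean : Int) (n : Int) : List Int :=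
  let need := (n + rolls.length) * mean - rolls.sum
  if n ≤ need ∧ need ≤ 6 * n then
    let q := PySem.Int.floordiv (need - n) 5
    let r := PySem.Int.mod (need - n) 5
    if r ≠ 0 then List.replicate q.toNat 6 ++ (1 + r) :: List.replicate (n - q - 1).toNat 1
    else List.replicate q.toNat 6 ++ List.replicate (n - q).toNat 1
  else []

-- ===== PRECONDITION & SPEC =====
def Spec_missingRolls_0 (rolls : List Int) (mean : Int) (n : Int) (out : List Int) : Prop := out = missingRolls_0_alt rolls mean n
instance (rolls : List Int) (mean : Int) (n : Int) (out : List Int) : Decidable (Spec_missingRolls_0 rolls mean n out) := by unfold Spec_missingRolls_0; infer_instance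

-- ===== CLAIM (what is proved, stated in full; the proofs are below) =====
def Claim_equal_missingRolls_0 : Prop := ∀ (rolls : List Int) (mean : Int) (n : Int), Dom_missingRolls_0 rolls mean n → Spec_missingRolls_0 rolls mean n (missingRolls_0 rolls mean n)

-- ===== LEMMAS AND PROOFS =====

-- result of distributing u extra pips over m slots that start at 1 (cap 6 per slot)
def pvDist (u m : Nat) : List Int :=
  if u % 5 = 0 then List.replicate (u / 5) (6 : Int) ++ List.replicate (m - u / 5) 1
  else List.replicate (u / 5) (6 : Int) ++ ((1 + u % 5 : Nat) : Int) :: List.replicate (m - u / 5 - 1) 1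

theorem pvSetAdd_at (i : Nat) (c : Int) (rest : List Int) :
    pvSetAdd (List.replicate i (6 : Int) ++ c :: rest) i = List.replicate i 6 ++ (c + 1) :: rest := by
  induction i with
  | zero => rfl
  | succ j ih => simp [List.replicate_succ, pvSetAdd, ih]

theorem pvGetD_at (i : Nat) (c : Int) (rest : List Int) :
    (List.replicate i (6 : Int) ++ c :: rest).getD i 0 = c := by
  induction i with
  | zero => rfl
  | succ j ih => simp [List.replicate_succ, ih]

theorem pvLoopA_key (k : Nat) : ∀ (i t c : Nat), 1 ≤ c → c ≤ 5 → k + c - 1 ≤ 5 * (t + 1) →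
    pvLoopA (List.replicate i (6 : Int) ++ ((c : Nat) : Int) :: List.replicate t 1) i ((k : Nat) : Int)
      = List.replicate i 6 ++ pvDist (k + c - 1) (t + 1) := by
  induction k with
  | zero =>
    intro i t c h1 h5 hb
    rw [pvLoopA]
    rw [if_neg (by omega)]
    congr 1
    by_cases hc : c = 1
    · subst hc
      simp [pvDist, List.replicate_succ]
    · have h2 : 2 ≤ c := by omega
      unfold pvDist
      rw [if_neg (by omega)]
      rw [show (0 + c - 1) / 5 = 0 from by omega]
      simp only [List.replicate, List.nil_append, Nat.sub_zero]
      congr 1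
      omega
  | succ k ih =>
    intro i t c h1 h5 hb
    rw [pvLoopA]
    rw [if_pos (by omega)]
    simp only [pvSetAdd_at, pvGetD_at, beq_iff_eq]
    by_cases hc : c = 5
    · subst hc
      rw [if_pos (by norm_num)]
      have hre : List.replicate i (6 : Int) ++ ((((5 : Nat) : Nat) : Int) + 1) :: List.replicate t 1
          = List.replicate (i + 1) (6 : Int) ++ List.replicate t 1 := by
        rw [List.replicate_add]
        norm_num
      cases t with
      | zero =>
        have hk0 : k = 0 := by omega
        subst hk0
        rw [hre, pvLoopA]
        rw [if_neg (by omega)]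
        have hone : pvDist (0 + 1 + 5 - 1) (0 + 1) = [(6 : Int)] := by decide
        rw [hone, List.replicate_add]
        simp
      | succ t' =>
        have hrest : List.replicate (t' + 1) (1 : Int) = (((1 : Nat) : Nat) : Int) :: List.replicate t' 1 := by
          simp [List.replicate_succ]
        rw [hre, hrest]
        have hcast : ((k + 1 : Nat) : Int) - 1 = ((k : Nat) : Int) := by push_cast; ring
        rw [hcast]
        rw [ih (i + 1) t' 1 (by omega) (by omega) (by omega)]
        have hstep : pvDist (k + 1 + 5 - 1) (t' + 1 + 1) = (6 : Int) :: pvDist (k + 1 - 1) (t' + 1) := by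
          have hu : k + 1 + 5 - 1 = (k + 1 - 1) + 5 := by omega
          rw [hu]
          unfold pvDist
          rw [show ((k + 1 - 1) + 5) / 5 = (k + 1 - 1) / 5 + 1 from by omega,
            show ((k + 1 - 1) + 5) % 5 = (k + 1 - 1) % 5 from by omega,
            show t' + 1 + 1 - ((k + 1 - 1) / 5 + 1) = t' + 1 - (k + 1 - 1) / 5 from by omega,
            List.replicate_succ]
          split <;> simp [List.cons_append]
        rw [hstep, List.replicate_add]
        simp
    · rw [if_neg (by omega)]
      have hcast : ((k + 1 : Nat) : Int) - 1 = ((k : Nat) : Int) := by push_cast; ring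
      have hcc : ((c : Nat) : Int) + 1 = ((c + 1 : Nat) : Int) := by push_cast; ring
      rw [hcast, hcc, ih i t (c + 1) (by omega) (by omega) (by omega)]
      congr 2
      omega

theorem missingRolls_0_spec : Claim_equal_missingRolls_0 := by
  intro rolls mean n _
  unfold Spec_missingRolls_0 missingRolls_0 missingRolls_0_alt
  have hsum : rolls.foldl (fun acc roll => acc + roll) 0 = rolls.sum := by
    rw [List.sum_eq_foldl]
  simp only [hsum]
  set need := (n + (rolls.length : Int)) * mean - rolls.sum with hneed
  by_cases hcond : need > 6 * n ∨ need < n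
  · rw [if_pos hcond, if_neg (by omega)]
  · rw [if_neg hcond, if_pos (by omega)]
    obtain ⟨hle6, hgen⟩ := not_or.mp hcond
    have hn0 : 0 ≤ n := by omega
    have hs0 : 0 ≤ need - n := by omega
    set k : Nat := (need - n).toNat with hk
    have hkeq : (need - n) = (k : Int) := by omega
    by_cases hn : n = 0
    · subst hn
      have hneed0 : need = 0 := by omega
      rw [hneed0]
      rw [pvLoopA]
      norm_num [PySem.Int.mod, PySem.Int.floordiv]
    · have hn1 : 1 ≤ n := by omega
      have hrep : List.replicate n.toNat (1 : Int)
          = List.replicate 0 (6 : Int) ++ ((1 : Nat) : Int) :: List.replicate (n.toNat - 1) 1 := by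
        conv_lhs => rw [show n.toNat = (n.toNat - 1) + 1 from by omega]
        simp [List.replicate_succ]
      have hkb : k ≤ 5 * n.toNat := by omega
      rw [hkeq, hrep, pvLoopA_key k 0 (n.toNat - 1) 1 (by omega) (by omega) (by omega)]
      rw [show n.toNat - 1 + 1 = n.toNat from by omega]
      simp only [List.replicate, List.nil_append, Nat.add_sub_cancel]
      rw [show PySem.Int.floordiv ((k : Nat) : Int) 5 = ((k / 5 : Nat) : Int) from by
            rw [PySem.Int.floordiv_eq_ediv_of_pos (by omega)]; omega,
          show PySem.Int.mod ((k : Nat) : Int) 5 = ((k % 5 : Nat) : Int) from by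
            rw [PySem.Int.mod_eq_emod_of_pos (by omega)]; omega]
      unfold pvDist
      by_cases hr : k % 5 = 0
      · rw [if_pos hr, if_neg (by simp [hr])]
        rw [show ((((k / 5 : Nat)) : Int)).toNat = k / 5 from Int.toNat_natCast _,
            show (n - (((k / 5 : Nat)) : Int)).toNat = n.toNat - k / 5 from by omega]
      · rw [if_neg hr, if_pos (by omega)]
        rw [show ((((k / 5 : Nat)) : Int)).toNat = k / 5 from Int.toNat_natCast _,
            show ((1 + k % 5 : Nat) : Int) = 1 + ((k % 5 : Nat) : Int) from by push_cast; ring,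
            show (n - (((k / 5 : Nat)) : Int) - 1).toNat = n.toNat - k / 5 - 1 from by omega]
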